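-- pv_equiv track=rewrite | github.com/Mefodii/CodeForces | Educational Codeforces Round 1/A.py | smartSum
-- ===== SOURCE A (Python) =====
-- def smartSum(n):
--     s = n*(n+1) // 2
--     power = 0
--     current = 1
--     while current <= n:
--         power += 1
--         current *= 2
--     diff = (current - 1) * 2
--     return int(s - diff)
-- ===== SOURCE B (Python) =====
-- def smartSum(n):
--     s = n * (n + 1) // 2
--     current = (1 << n.bit_length()) if n >= 1 else 1
--     return int(s - (current - 1) * 2)
-- ===== Notes on version B (the rewrite author's own statement) =====
-- stated objective: idiomatic
-- what changed: The while-loop that repeatedly doubles current until it exceeds n is replaced by a direct shift of the input's bit_length (with a branch for non-positive inputs, where the loop never runs), removing the loop entirely.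
import Mathlib
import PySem

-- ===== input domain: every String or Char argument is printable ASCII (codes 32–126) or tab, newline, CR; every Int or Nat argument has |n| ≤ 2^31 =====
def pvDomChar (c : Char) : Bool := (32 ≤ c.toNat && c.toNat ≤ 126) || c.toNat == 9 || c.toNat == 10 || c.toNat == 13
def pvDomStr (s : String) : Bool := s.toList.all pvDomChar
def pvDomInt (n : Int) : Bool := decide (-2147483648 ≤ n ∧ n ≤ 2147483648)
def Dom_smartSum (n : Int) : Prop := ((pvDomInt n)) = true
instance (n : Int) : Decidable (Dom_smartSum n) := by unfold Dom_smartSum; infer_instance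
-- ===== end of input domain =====

-- B replaces A's doubling while-loop by the closed form 1 << n.bit_length() (idiomatic, loop-free).

-- ===== PORT A =====
-- A's while-loop: doubles current (and bumps power) while current <= n.
-- current starts at 1 in A, so 0 < current is an invariant; it is carried only for termination.
def smartSumLoop (n : Int) (power : Int) (current : Nat) (hc : 0 < current) : Int × Nat :=
  if h : (current : Int) ≤ n then
    smartSumLoop n (power + 1) (current * 2) (by omega)
  else
    (power, current)
termination_by (n + 1 - current).toNat
decreasing_by omega

def smartSum (n : Int) : Int :=
  let s := PySem.Int.floordiv (n * (n + 1)) 2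
  let pc := smartSumLoop n 0 1 (by omega)
  let diff := ((pc.2 : Int) - 1) * 2
  s - diff

-- ===== PORT B =====
def smartSum_alt (n : Int) : Int :=
  let s := PySem.Int.floordiv (n * (n + 1)) 2
  let current : Int := if 1 ≤ n then 2 ^ PySem.Int.bitLength n else 1
  s - (current - 1) * 2

-- ===== PRECONDITION & SPEC =====
def Spec_smartSum (n : Int) (out : Int) : Prop := out = smartSum_alt n
instance (n : Int) (out : Int) : Decidable (Spec_smartSum n out) := by unfold Spec_smartSum; infer_instance

-- ===== CLAIM (what is proved, stated in full; the proofs are below) =====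
def Claim_equal_smartSum : Prop := ∀ (n : Int), Dom_smartSum n → Spec_smartSum n (smartSum n)

-- ===== LEMMAS AND PROOFS =====


theorem smartSumLoop_congr (n power : Int) (c1 c2 : Nat) (h1 : 0 < c1) (e : c1 = c2) :
    smartSumLoop n power c1 h1 = smartSumLoop n power c2 (e ▸ h1) := by
  subst e; rfl

theorem smartSumLoop_pow (n : Int) : ∀ (m k : Nat) (power : Int),
    PySem.Int.bitLength n - k ≤ m →
    ((2 ^ k : Nat) : Int) ≤ n →
    (smartSumLoop n power (2 ^ k) (Nat.two_pow_pos k)).2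
      = 2 ^ PySem.Int.bitLength n := by
  intro m
  induction m with
  | zero =>
    intro k power hm hk
    exfalso
    have hne : n ≠ 0 := by
      have := Nat.two_pow_pos k; omega
    have hna1 : 2 ^ k ≤ n.natAbs := by omega
    have hb1 : n.natAbs < 2 ^ PySem.Int.bitLength n := PySem.Int.lt_two_pow_bitLength n
    have : k < PySem.Int.bitLength n := by
      by_contra hc
      have : 2 ^ PySem.Int.bitLength n ≤ 2 ^ k :=
        Nat.pow_le_pow_right (by omega) (by omega)
      omega
    omega
  | succ m ih =>
    intro k power hm hk
    rw [smartSumLoop]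
    simp only [hk, dif_pos]
    have hmul : (2 ^ k * 2 : Nat) = 2 ^ (k + 1) := by ring
    by_cases h2 : ((2 ^ (k + 1) : Nat) : Int) ≤ n
    · have hne : n ≠ 0 := by
        have := Nat.two_pow_pos k; omega
      have hb1 : n.natAbs < 2 ^ PySem.Int.bitLength n := PySem.Int.lt_two_pow_bitLength n
      have hlt : k + 1 < PySem.Int.bitLength n := by
        by_contra hc
        have : 2 ^ PySem.Int.bitLength n ≤ 2 ^ (k + 1) :=
          Nat.pow_le_pow_right (by omega) (by omega)
        have : (2:Nat) ^ (k+1) ≤ n.natAbs := by omega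
        omega
      rw [smartSumLoop_congr n (power + 1) (2 ^ k * 2) (2 ^ (k + 1)) _ hmul]
      exact ih (k + 1) (power + 1) (by omega) h2
    · rw [smartSumLoop_congr n (power + 1) (2 ^ k * 2) (2 ^ (k + 1)) _ hmul]
      rw [smartSumLoop]
      simp only [h2, dif_neg, not_false_iff]
      have hne : n ≠ 0 := by
        have := Nat.two_pow_pos k; omega
      have hna1 : 2 ^ k ≤ n.natAbs := by omega
      have hna2 : n.natAbs < 2 ^ (k + 1) := by
        have := Nat.two_pow_pos (k+1); omega
      have hb1 : n.natAbs < 2 ^ PySem.Int.bitLength n := PySem.Int.lt_two_pow_bitLength n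
      have hb2 : 2 ^ (PySem.Int.bitLength n - 1) ≤ n.natAbs :=
        PySem.Int.two_pow_bitLength_le n hne
      have e1 : k < PySem.Int.bitLength n := by
        by_contra hc
        have : 2 ^ PySem.Int.bitLength n ≤ 2 ^ k :=
          Nat.pow_le_pow_right (by omega) (by omega)
        omega
      have e2 : PySem.Int.bitLength n - 1 < k + 1 := by
        by_contra hc
        have : 2 ^ (k + 1) ≤ 2 ^ (PySem.Int.bitLength n - 1) :=
          Nat.pow_le_pow_right (by omega) (by omega)
        omega
      have heq : PySem.Int.bitLength n = k + 1 := by omega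
      simp [heq]

-- ===== VERDICT (by name: the statement is the Claim_ definition above) =====
theorem smartSum_spec : Claim_equal_smartSum := by
  intro n _
  unfold Spec_smartSum smartSum smartSum_alt
  show PySem.Int.floordiv (n * (n + 1)) 2
        - (((smartSumLoop n 0 1 (by omega)).2 : Int) - 1) * 2
      = PySem.Int.floordiv (n * (n + 1)) 2
        - ((if 1 ≤ n then (2 : Int) ^ PySem.Int.bitLength n else 1) - 1) * 2
  by_cases h : 1 ≤ n
  · have hw : (smartSumLoop n 0 1 (by omega)).2 = 2 ^ PySem.Int.bitLength n :=
      smartSumLoop_pow n (PySem.Int.bitLength n) 0 0 (by omega) (by simpa using h)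
    rw [hw, if_pos h]
    push_cast
    ring
  · have hl : smartSumLoop n 0 1 (by omega) = (0, 1) := by
      rw [smartSumLoop]
      simp [h]
    rw [hl, if_neg h]
    norm_num
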